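-- pv_equiv track=rewrite | github.com/inhanp/Python_program | programming/programming10.py | xyBalance
-- ===== SOURCE A (Python) =====
-- def xyBalance(testStr):
--     '''
--     We'll say that a string is xy-balanced if for all the 'x' characters in the string, there
--     exists a 'y' character somewhere later in the string.  So "xxy" is balanced, but "xyx" is
--     not.  One "y" can balance multiple "x"s.  Return true if the given string is xy-balanced.
--     '''
--     numx = -1
--     numy = -1
--
--     for x in range(len(testStr)):
--         if testStr[x] == 'x':
--             numx = x
--         elif testStr[x] == 'y':
--             numy = x
--
--     if numx <= numy:
--         return True
--     return False
-- ===== SOURCE B (Python) =====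
-- def xyBalance(testStr):
--     seen_y = False
--     for i in range(len(testStr) - 1, -1, -1):
--         c = testStr[i]
--         if c == 'y':
--             seen_y = True
--         elif c == 'x' and not seen_y:
--             return False
--     return True
-- ===== Notes on version B (the rewrite author's own statement) =====
-- stated objective: alternative
-- what changed: B scans the string right-to-left maintaining a seen_y flag and early-exits on an unbalanced 'x', instead of A's forward pass recording last-'x'/last-'y' indices and comparing them at the end.
import Mathlib
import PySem

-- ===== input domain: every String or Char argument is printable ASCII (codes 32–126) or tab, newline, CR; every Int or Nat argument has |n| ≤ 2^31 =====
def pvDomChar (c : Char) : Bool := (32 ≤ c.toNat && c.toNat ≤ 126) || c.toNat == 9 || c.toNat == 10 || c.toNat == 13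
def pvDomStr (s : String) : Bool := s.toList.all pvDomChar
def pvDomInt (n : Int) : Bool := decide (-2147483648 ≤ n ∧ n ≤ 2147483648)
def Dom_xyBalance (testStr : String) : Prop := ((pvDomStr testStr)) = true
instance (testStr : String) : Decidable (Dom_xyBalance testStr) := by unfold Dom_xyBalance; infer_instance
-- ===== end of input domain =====

-- B scans right-to-left with a seen_y flag and early exit; A records last-'x'/last-'y' indices in a forward pass. Return values proved equal; neither mutates.

-- ===== PORT A =====
-- forward pass over (index, char) pairs, exactly A's loop state (numx, numy)
def xyBalanceFold (cs : List Char) : Int × Int :=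
  (PySem.List.enumerate cs).foldl
    (fun (p : Int × Int) ic =>
      if ic.2 = 'x' then (ic.1, p.2)
      else if ic.2 = 'y' then (p.1, ic.1)
      else p)
    (-1, -1)

def xyBalance (testStr : String) : Bool :=
  let st := xyBalanceFold testStr.toList
  if st.1 ≤ st.2 then true else false

-- ===== PORT B =====
-- Source B's reverse loop: head of the reversed character list = current character
def xyBalanceRev : List Char → Bool → Bool
  | [], _ => true
  | c :: rest, seenY =>
      if c = 'y' then xyBalanceRev rest true
      else if c = 'x' ∧ ¬seenY then false
      else xyBalanceRev rest seenY

def xyBalance_alt (testStr : String) : Bool :=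
  xyBalanceRev testStr.toList.reverse false

-- ===== PRECONDITION & SPEC =====
def Spec_xyBalance (testStr : String) (out : Bool) : Prop := out = xyBalance_alt testStr
instance (testStr : String) (out : Bool) : Decidable (Spec_xyBalance testStr out) := by unfold Spec_xyBalance; infer_instance

-- ===== CLAIM (what is proved, stated in full; the proofs are below) =====
def Claim_equal_xyBalance : Prop := ∀ (testStr : String), Dom_xyBalance testStr → Spec_xyBalance testStr (xyBalance testStr)

-- ===== LEMMAS AND PROOFS =====

-- once a 'y' has been seen, B's loop can never return False
theorem xyBalanceRev_true (l : List Char) : xyBalanceRev l true = true := by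
  induction l with
  | nil => rfl
  | cons c rest ih =>
      simp only [xyBalanceRev]
      split_ifs <;> simp_all

-- appending one character extends A's fold by one step
theorem xyBalanceFold_append (cs : List Char) (c : Char) :
    xyBalanceFold (cs ++ [c]) =
      (if c = 'x' then ((cs.length : Int), (xyBalanceFold cs).2)
       else if c = 'y' then ((xyBalanceFold cs).1, (cs.length : Int))
       else xyBalanceFold cs) := by
  simp only [xyBalanceFold, PySem.List.enumerate_append, List.foldl_append]
  simp [PySem.List.enumerate]

-- A's recorded indices stay below the length
theorem xyBalanceFold_lt (cs : List Char) :
    (xyBalanceFold cs).1 < (cs.length : Int) ∧ (xyBalanceFold cs).2 < (cs.length : Int) := by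
  induction cs using List.reverseRecOn with
  | nil => simp [xyBalanceFold, PySem.List.enumerate]
  | append_singleton cs c ih =>
      rw [xyBalanceFold_append]
      rcases ih with ⟨h1, h2⟩
      split_ifs <;> simp <;> omega

theorem xyBalance_eq (cs : List Char) :
    (if (xyBalanceFold cs).1 ≤ (xyBalanceFold cs).2 then true else false)
      = xyBalanceRev cs.reverse false := by
  induction cs using List.reverseRecOn with
  | nil => simp [xyBalanceFold, PySem.List.enumerate, xyBalanceRev]
  | append_singleton cs c ih =>
      rw [xyBalanceFold_append]
      rcases xyBalanceFold_lt cs with ⟨h1, h2⟩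
      simp only [List.reverse_append, List.reverse_singleton, List.singleton_append,
        xyBalanceRev]
      by_cases hy : c = 'y'
      · subst hy
        simp [xyBalanceRev_true]
        omega
      · by_cases hx : c = 'x'
        · subst hx
          simp [hy]
          omega
        · simp [hx, hy, ih]

-- ===== VERDICT (by name: the statement is the Claim_ definition above) =====
theorem xyBalance_spec : Claim_equal_xyBalance := by
  intro s _
  unfold Spec_xyBalance xyBalance xyBalance_alt
  exact xyBalance_eq s.toList
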